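-- pv_equiv track=rewrite | github.com/Dankerbadge/betting-bot | tests/test_trading_confidence_workflow_sync.py | _workflow_contains_run_command
-- ===== SOURCE A (Python) =====
-- def _strip_optional_quotes(value: str) -> str:
--     value = value.strip()
--     if len(value) >= 2 and value[0] == value[-1] and value[0] in {'"', "'"}:
--         return value[1:-1]
--     return value
--
-- def _strip_inline_comment(value: str) -> str:
--     in_single = False
--     in_double = False
--     escaped = False
--
--     for idx, char in enumerate(value):
--         if escaped:
--             escaped = False
--             continue
--         if char == "\\":
--             escaped = True
--             continue
--         if char == "'" and not in_double:
--             in_single = not in_single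
--             continue
--         if char == '"' and not in_single:
--             in_double = not in_double
--             continue
--         if (
--             char == "#"
--             and not in_single
--             and not in_double
--             and (idx == 0 or value[idx - 1].isspace())
--         ):
--             return value[:idx].rstrip()
--
--     return value.rstrip()
--
-- def _line_indent(raw_line: str) -> int:
--     return len(raw_line) - len(raw_line.lstrip(" "))
--
-- def _workflow_contains_run_command(workflow_text: str, expected_command: str) -> bool:
--     lines = workflow_text.splitlines()
--     index = 0
--
--     while index < len(lines):
--         raw_line = lines[index]
--         stripped = raw_line.strip()
--
--         if not stripped or stripped.startswith("#") or not stripped.startswith("run:"):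
--             index += 1
--             continue
--
--         run_indent = _line_indent(raw_line)
--         run_value = _strip_inline_comment(stripped[len("run:") :].strip())
--
--         if run_value and not run_value.startswith(("|", ">")):
--             normalized_run = _strip_optional_quotes(run_value)
--             if normalized_run == expected_command:
--                 return True
--             index += 1
--             continue
--
--         index += 1
--         while index < len(lines):
--             block_line = lines[index]
--             block_stripped = block_line.strip()
--
--             if not block_stripped:
--                 index += 1
--                 continue
--
--             block_indent = _line_indent(block_line)
--             if block_indent <= run_indent:
--                 break
--
--             normalized_block_line = _strip_optional_quotes(
--                 _strip_inline_comment(block_stripped).strip()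
--             )
--             if normalized_block_line == expected_command:
--                 return True
--
--             index += 1
--
--     return False
-- ===== SOURCE B (Python) =====
-- def _strip_optional_quotes(value: str) -> str:
--     value = value.strip()
--     if len(value) >= 2 and value[0] == value[-1] and value[0] in {'"', "'"}:
--         return value[1:-1]
--     return value
--
-- def _strip_inline_comment(value: str) -> str:
--     in_single = False
--     in_double = False
--     escaped = False
--
--     for idx, char in enumerate(value):
--         if escaped:
--             escaped = False
--             continue
--         if char == "\\":
--             escaped = True
--             continue
--         if char == "'" and not in_double:
--             in_single = not in_single
--             continue
--         if char == '"' and not in_single: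
--             in_double = not in_double
--             continue
--         if (
--             char == "#"
--             and not in_single
--             and not in_double
--             and (idx == 0 or value[idx - 1].isspace())
--         ):
--             return value[:idx].rstrip()
--
--     return value.rstrip()
--
-- def _line_indent(raw_line: str) -> int:
--     return len(raw_line) - len(raw_line.lstrip(" "))
--
-- def _workflow_contains_run_command(workflow_text: str, expected_command: str) -> bool:
--     # single flat scan with explicit block-scalar state instead of nested while loops
--     threshold = None  # indent of the current `run:` line when inside a block scalar
--     for raw_line in workflow_text.splitlines():
--         stripped = raw_line.strip()
--         if threshold is not None:
--             if not stripped: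
--                 continue
--             if _line_indent(raw_line) > threshold:
--                 if _strip_optional_quotes(_strip_inline_comment(stripped).strip()) == expected_command:
--                     return True
--                 continue
--             threshold = None  # dedent: leave the block and treat this very line as a normal line
--         if not stripped or stripped.startswith("#") or not stripped.startswith("run:"):
--             continue
--         run_value = _strip_inline_comment(stripped[len("run:"):].strip())
--         if run_value and not run_value.startswith(("|", ">")):
--             if _strip_optional_quotes(run_value) == expected_command:
--                 return True
--         else:
--             threshold = _line_indent(raw_line)
--     return False
-- ===== Notes on version B (the rewrite author's own statement) =====
-- stated objective: simpler
-- what changed: Replaced A's outer while loop with a nested inner while (and its break-without-advancing handoff) by a single flat scan over the lines with an explicit block-scalar threshold state that re-processes a dedented line as a normal line in the same pass.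
import Mathlib
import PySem

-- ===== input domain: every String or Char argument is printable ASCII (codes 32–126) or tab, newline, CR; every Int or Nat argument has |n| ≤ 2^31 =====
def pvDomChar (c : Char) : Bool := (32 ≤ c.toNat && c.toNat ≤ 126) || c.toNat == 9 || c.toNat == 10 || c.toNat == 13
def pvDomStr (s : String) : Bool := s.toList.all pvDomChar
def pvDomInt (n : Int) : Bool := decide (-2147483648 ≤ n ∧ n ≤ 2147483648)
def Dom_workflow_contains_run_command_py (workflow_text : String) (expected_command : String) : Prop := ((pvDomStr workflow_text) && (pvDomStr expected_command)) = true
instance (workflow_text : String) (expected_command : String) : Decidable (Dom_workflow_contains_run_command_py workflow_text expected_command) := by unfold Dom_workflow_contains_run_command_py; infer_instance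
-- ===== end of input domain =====

-- B rewrites A's outer-while + inner-while as ONE flat scan with an explicit block-scalar
-- threshold state (objective: simpler decomposition; same asymptotic cost).

-- ===== PORT A =====
-- shared helpers: ports of _strip_optional_quotes, _strip_inline_comment, _line_indent
-- (B's Python keeps these three helpers verbatim, so both ports share them)

-- _strip_optional_quotes
def pvStripQ (v0 : List Char) : List Char :=
  let v := PySem.Chars.strip v0
  if 2 ≤ v.length ∧ PySem.List.pyGet? v 0 = PySem.List.pyGet? v (-1) ∧
      (PySem.List.pyGet? v 0 = some '"' ∨ PySem.List.pyGet? v 0 = some '\'') then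
    PySem.List.slice v (some 1) (some (-1))
  else v

-- _strip_inline_comment: the for-loop over enumerate(value) with escape/quote state.
-- full[idx-1]? is Python's value[idx-1] (only read when idx ≠ 0, hence always in range);
-- hand-ported step for step (exact: each branch in the Python's order).
def pvSicGo (full : List Char) (rem : List Char) (idx : Nat) (inS inD esc : Bool) : List Char :=
  match rem with
  | [] => PySem.Chars.rstrip full
  | c :: rest =>
    if esc then pvSicGo full rest (idx+1) inS inD false
    else if c == '\\' then pvSicGo full rest (idx+1) inS inD true
    else if c == '\'' && !inD then pvSicGo full rest (idx+1) (!inS) inD esc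
    else if c == '"' && !inS then pvSicGo full rest (idx+1) inS (!inD) esc
    else if c == '#' && !inS && !inD &&
        (idx == 0 || (full[idx-1]?).elim false PySem.Chars.isspace) then
      PySem.Chars.rstrip (full.take idx)
    else pvSicGo full rest (idx+1) inS inD esc

def pvSic (v : List Char) : List Char := pvSicGo v v 0 false false false

-- _line_indent: len(raw) - len(raw.lstrip(" ")); lstrip(" ") drops leading ' ' (exact)
def pvIndent (raw : List Char) : Nat := raw.length - (raw.dropWhile (· == ' ')).length

-- A's inner while loop: returns (found?, lines remaining for the outer loop).
-- A break (dedented non-blank line) leaves that line in place so the outer loop re-reads it.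
def pvBlockA (ec : List Char) (runIndent : Nat) (lines : List (List Char)) :
    Bool × List (List Char) :=
  match lines with
  | [] => (false, [])
  | bl :: rest =>
    if (PySem.Chars.strip bl).isEmpty then pvBlockA ec runIndent rest
    else if pvIndent bl ≤ runIndent then (false, bl :: rest)
    else if pvStripQ (PySem.Chars.strip (pvSic (PySem.Chars.strip bl))) == ec then (true, rest)
    else pvBlockA ec runIndent rest

-- the remaining-lines list never grows (used by pvLoopA's termination)
theorem pvBlockA_len (ec : List Char) (i : Nat) (ls : List (List Char)) :
    (pvBlockA ec i ls).2.length ≤ ls.length := by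
  induction ls with
  | nil => simp [pvBlockA]
  | cons bl rest ih =>
    simp only [pvBlockA]
    split_ifs <;> simp_all <;> omega

-- A's outer while loop over the lines
def pvLoopA (ec : List Char) (lines : List (List Char)) : Bool :=
  match lines with
  | [] => false
  | raw :: rest =>
    if (PySem.Chars.strip raw).isEmpty
        || PySem.Chars.startswith (PySem.Chars.strip raw) ['#']
        || !PySem.Chars.startswith (PySem.Chars.strip raw) ['r','u','n',':'] then
      pvLoopA ec rest
    else
      if !(pvSic (PySem.Chars.strip (PySem.List.slice (PySem.Chars.strip raw) (some 4)))).isEmpty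
          && !(PySem.Chars.startswith (pvSic (PySem.Chars.strip (PySem.List.slice (PySem.Chars.strip raw) (some 4)))) ['|']
               || PySem.Chars.startswith (pvSic (PySem.Chars.strip (PySem.List.slice (PySem.Chars.strip raw) (some 4)))) ['>']) then
        if pvStripQ (pvSic (PySem.Chars.strip (PySem.List.slice (PySem.Chars.strip raw) (some 4)))) == ec then true
        else pvLoopA ec rest
      else
        if (pvBlockA ec (pvIndent raw) rest).1 then true
        else pvLoopA ec (pvBlockA ec (pvIndent raw) rest).2
termination_by lines.length
decreasing_by
  · simp
  · simp
  · exact Nat.lt_succ_of_le (pvBlockA_len ec (pvIndent raw) rest)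

def workflow_contains_run_command_py (workflow_text : String) (expected_command : String) : Bool :=
  pvLoopA expected_command.toList (PySem.Chars.splitlines workflow_text.toList)

-- ===== PORT B =====
-- B: one flat scan; `some t` = inside a block scalar whose `run:` line had indent t.
mutual
-- the per-line step of B's single loop
def pvLoopB (ec : List Char) (thr : Option Nat) (lines : List (List Char)) : Bool :=
  match lines with
  | [] => false
  | raw :: rest =>
    match thr with
    | some t =>
      if (PySem.Chars.strip raw).isEmpty then pvLoopB ec (some t) rest
      else if t < pvIndent raw then
        if pvStripQ (PySem.Chars.strip (pvSic (PySem.Chars.strip raw))) == ec then true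
        else pvLoopB ec (some t) rest
      else pvStepB ec raw rest   -- dedent: leave the block, treat this very line as normal
    | none => pvStepB ec raw rest
termination_by lines.length * 2

-- B's handling of a normal (non-block) line raw, with rest still to scan
def pvStepB (ec : List Char) (raw : List Char) (rest : List (List Char)) : Bool :=
  if (PySem.Chars.strip raw).isEmpty
      || PySem.Chars.startswith (PySem.Chars.strip raw) ['#']
      || !PySem.Chars.startswith (PySem.Chars.strip raw) ['r','u','n',':'] then
    pvLoopB ec none rest
  else
    if !(pvSic (PySem.Chars.strip (PySem.List.slice (PySem.Chars.strip raw) (some 4)))).isEmpty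
        && !(PySem.Chars.startswith (pvSic (PySem.Chars.strip (PySem.List.slice (PySem.Chars.strip raw) (some 4)))) ['|']
             || PySem.Chars.startswith (pvSic (PySem.Chars.strip (PySem.List.slice (PySem.Chars.strip raw) (some 4)))) ['>']) then
      if pvStripQ (pvSic (PySem.Chars.strip (PySem.List.slice (PySem.Chars.strip raw) (some 4)))) == ec then true
      else pvLoopB ec none rest
    else pvLoopB ec (some (pvIndent raw)) rest
termination_by rest.length * 2 + 1
end

def workflow_contains_run_command_py_alt (workflow_text : String) (expected_command : String) : Bool :=
  pvLoopB expected_command.toList none (PySem.Chars.splitlines workflow_text.toList)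

-- ===== PRECONDITION & SPEC =====
def Spec_workflow_contains_run_command_py (workflow_text : String) (expected_command : String) (out : Bool) : Prop := out = workflow_contains_run_command_py_alt workflow_text expected_command
instance (workflow_text : String) (expected_command : String) (out : Bool) : Decidable (Spec_workflow_contains_run_command_py workflow_text expected_command out) := by unfold Spec_workflow_contains_run_command_py; infer_instance

-- ===== CLAIM (what is proved, stated in full; the proofs are below) =====
def Claim_equal_workflow_contains_run_command_py : Prop := ∀ (workflow_text : String) (expected_command : String), Dom_workflow_contains_run_command_py workflow_text expected_command → Spec_workflow_contains_run_command_py workflow_text expected_command (workflow_contains_run_command_py workflow_text expected_command)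

-- ===== LEMMAS AND PROOFS =====

-- while B is in block state `some t`, it computes exactly A's inner loop, then
-- resumes as A does: on the dedented line left in place by pvBlockA.
theorem pvLoopB_some (ec : List Char) (t : Nat) (rest : List (List Char)) :
    pvLoopB ec (some t) rest
      = (if (pvBlockA ec t rest).1 then true else pvLoopB ec none (pvBlockA ec t rest).2) := by
  induction rest with
  | nil => simp [pvLoopB, pvBlockA]
  | cons bl rest ih =>
    rw [pvLoopB, pvBlockA]
    by_cases h1 : (PySem.Chars.strip bl).isEmpty
    · simpa [h1] using ih
    · by_cases h2 : pvIndent bl ≤ t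
      · have h2' : ¬ t < pvIndent bl := by omega
        simp [h1, h2, h2', pvLoopB]
      · have h2' : t < pvIndent bl := by omega
        by_cases h3 : pvStripQ (PySem.Chars.strip (pvSic (PySem.Chars.strip bl))) == ec
        · simp [h1, h2, h2', h3]
        · simpa [h1, h2, h2', h3] using ih

theorem pvLoopA_eq (ec : List Char) (n : Nat) (lines : List (List Char))
    (hn : lines.length ≤ n) : pvLoopA ec lines = pvLoopB ec none lines := by
  induction n generalizing lines with
  | zero =>
    have : lines = [] := by
      cases lines with
      | nil => rfl
      | cons a l => simp at hn
    subst this; simp [pvLoopA, pvLoopB]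
  | succ n ih =>
    cases lines with
    | nil => simp [pvLoopA, pvLoopB]
    | cons raw rest =>
      have hr : rest.length ≤ n := by simpa using hn
      have hlen : (pvBlockA ec (pvIndent raw) rest).2.length ≤ n :=
        le_trans (pvBlockA_len ec (pvIndent raw) rest) hr
      rw [pvLoopA, pvLoopB, pvStepB, pvLoopB_some]
      split_ifs with h1 h2 h3 h4
      · exact ih rest hr
      · rfl
      · exact ih rest hr
      · rfl
      · exact ih _ hlen

-- ===== VERDICT (by name: the statement is the Claim_ definition above) =====
theorem workflow_contains_run_command_py_spec : Claim_equal_workflow_contains_run_command_py := by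
  intro wt ec _
  unfold Spec_workflow_contains_run_command_py workflow_contains_run_command_py workflow_contains_run_command_py_alt
  exact pvLoopA_eq ec.toList _ _ le_rfl
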